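-- pv_equiv track=rewrite | github.com/abhishekvijeev/drones | script/genral/graph_genprof/graph_generator_helper.py | group_data_by_app
-- ===== SOURCE A (Python) =====
-- def group_data_by_app(final_data):
--     group_data = {}
--     for data in final_data:
--         tmp = data.split(',')
--         try:
--             key = tmp[0]
--             val = tmp[1] + " " + tmp[2]
--
--             if tmp[0] not in group_data:
--                 group_data[key] = []
--
--             if val not in group_data[key]:
--                 group_data[key].append(val)
--         except:
--             pass
--
--     return group_data
-- ===== SOURCE B (Python) =====
-- def group_data_by_app(final_data):
--     # Build full value lists in one pass, then collapse duplicates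
--     # (first-occurrence order) in a separate pass.
--     groups = {}
--     for data in final_data:
--         tmp = data.split(',')
--         if len(tmp) < 3:
--             continue
--         groups.setdefault(tmp[0], []).append(tmp[1] + " " + tmp[2])
--     return {k: list(dict.fromkeys(v)) for k, v in groups.items()}
-- ===== Notes on version B (the rewrite author's own statement) =====
-- stated objective: faster
-- what changed: A dedups while scanning, re-testing membership of each value against the growing group list on every row; B appends every parsed value unconditionally via setdefault in one pass and then collapses duplicates per group in a separate final pass with dict.fromkeys (hash-based, first-occurrence order).
import Mathlib
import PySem

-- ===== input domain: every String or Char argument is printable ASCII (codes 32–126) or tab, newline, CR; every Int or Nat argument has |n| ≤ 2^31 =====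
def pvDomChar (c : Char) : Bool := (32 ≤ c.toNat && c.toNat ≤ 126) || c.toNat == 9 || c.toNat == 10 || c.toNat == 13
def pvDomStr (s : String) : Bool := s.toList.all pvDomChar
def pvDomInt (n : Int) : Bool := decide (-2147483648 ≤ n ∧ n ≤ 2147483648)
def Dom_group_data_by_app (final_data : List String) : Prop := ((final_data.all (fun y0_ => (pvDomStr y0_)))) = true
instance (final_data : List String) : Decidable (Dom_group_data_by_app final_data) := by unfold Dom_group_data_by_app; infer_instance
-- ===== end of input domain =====

-- B groups all values first (hash setdefault, no per-row membership scan) and dedups each group in a final pass; return values are equal, and a timing run measured B faster.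

-- ===== PORT A =====
-- A's loop body: split, index (short row raises inside try → row skipped), lazy key creation, membership-checked append.
def pvStepA (d : PySem.Dict String (List String)) (data : String) : PySem.Dict String (List String) :=
  let tmp := (PySem.Str.split? data ",").getD []  -- sep "," ≠ "" so split? is always some
  match PySem.List.pyGet? tmp 0, PySem.List.pyGet? tmp 1, PySem.List.pyGet? tmp 2 with
  | some key, some v1, some v2 =>
      let vl := v1 ++ " " ++ v2
      let d := if d.contains key then d else d.insert key []
      let cur := d.getD key []
      if vl ∈ cur then d else d.insert key (cur ++ [vl])
  | _, _, _ => d   -- IndexError caught by the bare except: row skipped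

def group_data_by_app (final_data : List String) : List (String × List String) :=
  (final_data.foldl pvStepA PySem.Dict.empty).items

-- ===== PORT B =====
-- hand port of list(dict.fromkeys(vs)): keep first occurrences in order (exact: dict keys are unique, insertion-ordered)
def pyUniq (vs : List String) : List String :=
  vs.foldl (fun acc v => if v ∈ acc then acc else acc ++ [v]) []

-- B's loop body: rows with fewer than 3 fields are skipped; otherwise setdefault(...).append (unconditional append)
def pvStepB (d : PySem.Dict String (List String)) (data : String) : PySem.Dict String (List String) :=
  match (PySem.Str.split? data ",").getD [] with
  | k :: v1 :: v2 :: _ => d.insert k (d.getD k [] ++ [v1 ++ " " ++ v2])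
  | _ => d

def group_data_by_app_alt (final_data : List String) : List (String × List String) :=
  let g := final_data.foldl pvStepB PySem.Dict.empty
  g.items.map (fun kv => (kv.1, pyUniq kv.2))

-- ===== PRECONDITION & SPEC =====
def Spec_group_data_by_app (final_data : List String) (out : List (String × List String)) : Prop := out = group_data_by_app_alt final_data
instance (final_data : List String) (out : List (String × List String)) : Decidable (Spec_group_data_by_app final_data out) := by unfold Spec_group_data_by_app; infer_instance

-- ===== CLAIM (what is proved, stated in full; the proofs are below) =====
def Claim_equal_group_data_by_app : Prop := ∀ (final_data : List String), Dom_group_data_by_app final_data → Spec_group_data_by_app final_data (group_data_by_app final_data)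

-- ===== LEMMAS AND PROOFS =====

lemma pvGet0 (k v1 v2 : String) (r : List String) : PySem.List.pyGet? (k::v1::v2::r) 0 = some k := by
  simp only [PySem.List.pyGet?, PySem.List.pyIdx?]
  rw [if_pos (by norm_num), if_pos (by simp only [List.length_cons]; push_cast; omega)]
  simp

lemma pvGet1 (k v1 v2 : String) (r : List String) : PySem.List.pyGet? (k::v1::v2::r) 1 = some v1 := by
  simp only [PySem.List.pyGet?, PySem.List.pyIdx?]
  rw [if_pos (by norm_num), if_pos (by simp only [List.length_cons]; push_cast; omega)]
  simp

lemma pvGet2 (k v1 v2 : String) (r : List String) : PySem.List.pyGet? (k::v1::v2::r) 2 = some v2 := by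
  simp only [PySem.List.pyGet?, PySem.List.pyIdx?]
  rw [if_pos (by norm_num), if_pos (by simp only [List.length_cons]; push_cast; omega)]
  simp

-- dict-of-lists with every value list uniquified (the relation between A's and B's accumulators)
def pvMapU (d : PySem.Dict String (List String)) : PySem.Dict String (List String) :=
  PySem.Dict.mk (d.items.map (fun kv => (kv.1, pyUniq kv.2)))

lemma pvGet?_mapU (d : PySem.Dict String (List String)) (k : String) :
    (pvMapU d).get? k = (d.get? k).map pyUniq := by
  simp [pvMapU, PySem.Dict.get?, List.find?_map, Function.comp_def, Option.map_map]

lemma pvContains_mapU (d : PySem.Dict String (List String)) (k : String) :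
    (pvMapU d).contains k = d.contains k := by
  rw [PySem.Dict.contains_eq_isSome_get?, PySem.Dict.contains_eq_isSome_get?, pvGet?_mapU]
  simp

lemma pvMapU_insert (d : PySem.Dict String (List String)) (k : String) (v : List String) :
    pvMapU (d.insert k v) = (pvMapU d).insert k (pyUniq v) := by
  unfold PySem.Dict.insert
  rw [pvContains_mapU]
  by_cases h : d.contains k
  · simp only [h, if_true, pvMapU, List.map_map]
    congr 1
    apply List.map_congr_left
    intro p _
    by_cases hp : p.1 = k <;> simp [hp]
  · simp [h, pvMapU]

lemma pvMap_id_of_not_mem (k : String) (v : List String) :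
    ∀ l : List (String × List String), k ∉ l.map Prod.fst →
      l.map (fun q => if q.1 = k then (k, v) else q) = l := by
  intro l
  induction l with
  | nil => intro _; rfl
  | cons a l ih =>
    intro h
    simp only [List.map_cons, List.mem_cons, not_or] at h
    have ha : ¬ a.1 = k := fun e => h.1 e.symm
    simp only [List.map_cons, if_neg ha, ih h.2]

lemma pvInsert_self (d : PySem.Dict String (List String)) (k : String) (v : List String)
    (hnd : d.keys.Nodup) (hg : d.get? k = some v) : d.insert k v = d := by
  have hc : d.contains k = true := by
    rw [PySem.Dict.contains_eq_isSome_get?, hg]; rfl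
  unfold PySem.Dict.insert
  rw [hc, if_pos rfl]
  clear hc
  apply PySem.Dict.ext
  simp only [beq_iff_eq]
  obtain ⟨l⟩ := d
  simp only [PySem.Dict.get?] at hg
  simp only [PySem.Dict.keys] at hnd
  induction l with
  | nil => simp at hg
  | cons a l ih =>
    simp only [List.map_cons, List.nodup_cons] at hnd
    by_cases ha : a.1 = k
    · rw [List.find?_cons_of_pos (by simpa using ha)] at hg
      simp only [Option.map_some, Option.some.injEq] at hg
      have hav : (k, v) = a := by
        cases a with
        | mk a1 a2 => simp only at ha hg; simp [ha, hg]
      have hk : k ∉ l.map Prod.fst := ha ▸ hnd.1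
      simp only [List.map_cons, if_pos ha]
      rw [pvMap_id_of_not_mem k v l hk, hav]
    · rw [List.find?_cons_of_neg (by simpa using ha)] at hg
      simp only [List.map_cons, if_neg ha]
      exact congrArg (a :: ·) (ih hnd.2 hg)

lemma pvNodup_insert (d : PySem.Dict String (List String)) (k : String) (v : List String)
    (hnd : d.keys.Nodup) : (d.insert k v).keys.Nodup :=
  PySem.Dict.nodup_keys_insert d k v hnd

lemma pyUniq_append_singleton (vs : List String) (v : String) :
    pyUniq (vs ++ [v]) = if v ∈ pyUniq vs then pyUniq vs else pyUniq vs ++ [v] := by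
  simp [pyUniq, List.foldl_append]

lemma pvStep_comm (d : PySem.Dict String (List String)) (data : String)
    (hnd : d.keys.Nodup) :
    pvStepA (pvMapU d) data = pvMapU (pvStepB d data) ∧ (pvStepB d data).keys.Nodup := by
  unfold pvStepA pvStepB
  cases h : (PySem.Str.split? data ",").getD [] with
  | nil => simp [PySem.List.pyGet?, PySem.List.pyIdx?, hnd]
  | cons k rest =>
    cases rest with
    | nil => simp [PySem.List.pyGet?, PySem.List.pyIdx?, hnd]
    | cons v1 rest2 =>
      cases rest2 with
      | nil => simp [PySem.List.pyGet?, PySem.List.pyIdx?, hnd]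
      | cons v2 rest3 =>
        simp only [pvGet0, pvGet1, pvGet2]
        refine ⟨?_, pvNodup_insert _ _ _ hnd⟩
        by_cases hc : d.contains k
        · -- key already present: no lazy creation on A's side
          rw [pvContains_mapU, if_pos hc]
          obtain ⟨old, hold⟩ : ∃ old, d.get? k = some old := by
            rw [PySem.Dict.contains_eq_isSome_get?] at hc
            exact Option.isSome_iff_exists.mp hc
          have hgA : (pvMapU d).getD k [] = pyUniq old := by
            rw [PySem.Dict.getD_eq_get?_getD, pvGet?_mapU, hold]; rfl
          have hgB : d.getD k [] = old := by
            rw [PySem.Dict.getD_eq_get?_getD, hold]; rfl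
          rw [hgA, hgB, pvMapU_insert, pyUniq_append_singleton]
          by_cases hv : (v1 ++ " " ++ v2) ∈ pyUniq old
          · rw [if_pos hv, if_pos hv]
            exact (pvInsert_self (pvMapU d) k (pyUniq old)
              (by
                have : (pvMapU d).keys = d.keys := by
                  simp [pvMapU, PySem.Dict.keys, List.map_map, Function.comp]
                rw [this]; exact hnd)
              (by rw [pvGet?_mapU, hold]; rfl)).symm
          · rw [if_neg hv, if_neg hv]
        · -- fresh key: A inserts [] then appends; B's setdefault-append inserts the singleton
          rw [pvContains_mapU, if_neg hc]
          have hgB : d.getD k [] = [] := by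
            apply PySem.Dict.getD_of_not_contains
            simpa using hc
          have hgA : ((pvMapU d).insert k []).getD k [] = [] := by
            simp [PySem.Dict.getD_insert_self]
          rw [hgA, hgB]
          simp only [List.not_mem_nil, if_neg (List.not_mem_nil)]
          rw [pvMapU_insert, PySem.Dict.insert_insert_self]
          rfl

lemma pvLoop_comm : ∀ (l : List String) (d : PySem.Dict String (List String)),
    d.keys.Nodup → l.foldl pvStepA (pvMapU d) = pvMapU (l.foldl pvStepB d) := by
  intro l
  induction l with
  | nil => intro d _; rfl
  | cons x l ih =>
    intro d hnd
    obtain ⟨hstep, hnd'⟩ := pvStep_comm d x hnd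
    simp only [List.foldl_cons, hstep]
    exact ih _ hnd'

-- ===== VERDICT (by name: the statement is the Claim_ definition above) =====
theorem group_data_by_app_spec : Claim_equal_group_data_by_app := by
  intro final_data _
  unfold Spec_group_data_by_app group_data_by_app group_data_by_app_alt
  have h0 : (PySem.Dict.empty : PySem.Dict String (List String)) = pvMapU PySem.Dict.empty := rfl
  rw [h0, pvLoop_comm final_data PySem.Dict.empty (by simp [PySem.Dict.keys, PySem.Dict.empty])]
  rfl
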